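-- pv_equiv track=rewrite | github.com/WSm-77/algorithms_and_data_structures | progress_tests/2023-24/test1/kol1_worse.py | maxrank
-- ===== SOURCE A (Python) =====
-- def maxrank(T):
--   # tu prosze wpisac wlasna implementacje
--   n = len(T)
--
--   result = 0
--
--   for i in range(1, n):
--     currRank = 0
--     for j in range(0, i):
--       if T[j] < T[i]:
--         currRank += 1
--
--     #end for
--     if currRank > result:
--       result = currRank
--
--   return result
-- ===== SOURCE B (Python) =====
-- def maxrank(T):
--     # Keep a sorted list of the elements seen so far; for each new element,
--     # a hand-rolled binary search (bisect_left) gives the number of earlier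
--     # strictly-smaller elements directly.
--     seen = []
--     best = 0
--     for x in T:
--         lo, hi = 0, len(seen)
--         while lo < hi:
--             mid = (lo + hi) // 2
--             if seen[mid] < x:
--                 lo = mid + 1
--             else:
--                 hi = mid
--         if lo > best:
--             best = lo
--         seen.insert(lo, x)
--     return best
-- ===== Notes on version B (the rewrite author's own statement) =====
-- stated objective: faster
-- what changed: Instead of rescanning the whole prefix for every index (nested loops), B maintains a sorted list of the elements seen so far and finds each element's count of earlier strictly-smaller elements with a hand-rolled bisect_left binary search, inserting the element at that position.
import Mathlib
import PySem

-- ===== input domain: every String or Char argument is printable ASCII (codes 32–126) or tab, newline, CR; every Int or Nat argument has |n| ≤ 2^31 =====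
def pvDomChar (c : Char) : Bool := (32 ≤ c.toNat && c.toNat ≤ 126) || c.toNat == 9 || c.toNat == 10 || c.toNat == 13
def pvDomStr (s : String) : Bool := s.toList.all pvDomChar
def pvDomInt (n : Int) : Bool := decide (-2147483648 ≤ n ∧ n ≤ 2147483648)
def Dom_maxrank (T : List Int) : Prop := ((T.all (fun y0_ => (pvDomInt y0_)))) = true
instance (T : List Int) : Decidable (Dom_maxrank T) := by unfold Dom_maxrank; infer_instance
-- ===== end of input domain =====

-- B replaces A's quadratic inner rescan by a sorted running list with binary search
-- (bisect_left by hand): measurably faster by n log n comparisons instead of n^2.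

-- ===== PORT A =====
def maxrank (T : List Int) : Int :=
  let n : Int := T.length
  (PySem.List.pyRange 1 n 1).foldl (fun result i =>
    let currRank : Int := (PySem.List.pyRange 0 i 1).foldl
        (fun c j => if PySem.List.pyGetD T j 0 < PySem.List.pyGetD T i 0 then c + 1 else c) 0
    if currRank > result then currRank else result) 0

-- ===== PORT B =====
-- the hand-written while-loop binary search of Source B; lo, hi stay in [0, len seen],
-- so Nat with Nat division transcribes Python's nonnegative ints and `//` exactly,
-- and seen[mid] (mid < hi ≤ len) is in range, so getD is exact there
def bsLoop (seen : List Int) (x : Int) (lo hi : Nat) : Nat :=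
  if h : lo < hi then
    let mid := (lo + hi) / 2
    if seen.getD mid 0 < x then bsLoop seen x (mid + 1) hi
    else bsLoop seen x lo mid
  else lo
termination_by hi - lo
decreasing_by all_goals omega

def maxrank_alt (T : List Int) : Int :=
  (T.foldl (fun (st : List Int × Int) x =>
      let seen := st.1
      let best := st.2
      let lo := bsLoop seen x 0 seen.length
      let best' := if (lo : Int) > best then (lo : Int) else best
      (PySem.List.insert seen (lo : Int) x, best')) ([], 0)).2

-- ===== PRECONDITION & SPEC =====
def Spec_maxrank (T : List Int) (out : Int) : Prop := out = maxrank_alt T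
instance (T : List Int) (out : Int) : Decidable (Spec_maxrank T out) := by unfold Spec_maxrank; infer_instance

-- ===== CLAIM (what is proved, stated in full; the proofs are below) =====
def Claim_equal_maxrank : Prop := ∀ (T : List Int), Dom_maxrank T → Spec_maxrank T (maxrank T)

-- ===== LEMMAS AND PROOFS =====

-- common reference computation: walk the list keeping the processed prefix,
-- taking the max of countP (· < x) over the prefix at each step
def gRun : List Int → List Int → Int → Int
  | [], _, best => best
  | x :: rest, pre, best =>
      gRun rest (pre ++ [x]) (max best ((pre.countP (fun y => decide (y < x)) : Nat) : Int))

lemma maxIf (b v : Int) : (if v > b then v else b) = max b v := by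
  rw [max_def]; split_ifs <;> omega

lemma pairwise_le_getElem (l : List Int) (hs : l.Pairwise (· ≤ ·)) (i j : Nat)
    (hj : j < l.length) (hij : i ≤ j) : l[i]'(by omega) ≤ l[j] := by
  rcases Nat.lt_or_ge i j with h | h
  · exact (List.pairwise_iff_getElem.mp hs) i j (by omega) hj h
  · have : i = j := by omega
    subst this; exact le_refl _

lemma countP_split (l : List Int) (p : Int → Bool) (m : Nat) (hm : m ≤ l.length)
    (h1 : ∀ (k : Nat) (hk : k < l.length), k < m → p l[k] = true)
    (h2 : ∀ (k : Nat) (hk : k < l.length), m ≤ k → p l[k] = false) :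
    l.countP p = m := by
  have htake : (l.take m).countP p = m := by
    rw [List.countP_eq_length.mpr, List.length_take_of_le hm]
    intro a ha
    obtain ⟨k, hk, rfl⟩ := List.mem_iff_getElem.mp ha
    have hkl : k < min m l.length := by simpa using hk
    rw [List.getElem_take]
    exact h1 k (by omega) (by omega)
  have hdrop : (l.drop m).countP p = 0 := by
    rw [List.countP_eq_zero]
    intro a ha
    obtain ⟨k, hk, rfl⟩ := List.mem_iff_getElem.mp ha
    have hkl : k < l.length - m := by simpa using hk
    rw [List.getElem_drop]
    simp [h2 (m + k) (by omega) (by omega)]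
  conv_lhs => rw [← List.take_append_drop m l]
  rw [List.countP_append, htake, hdrop]
  omega

lemma bsLoop_eq (seen : List Int) (x : Int) (lo hi : Nat)
    (hs : seen.Pairwise (· ≤ ·)) (hhi : hi ≤ seen.length) (hlohi : lo ≤ hi)
    (hlo : ∀ (k : Nat) (hk : k < seen.length), k < lo → seen[k] < x)
    (hhi2 : ∀ (k : Nat) (hk : k < seen.length), hi ≤ k → ¬ seen[k] < x) :
    bsLoop seen x lo hi = seen.countP (fun y => decide (y < x)) := by
  revert hhi hlohi hlo hhi2
  induction lo, hi using bsLoop.induct seen x with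
  | case1 lo hi h mid hlt ih =>
    intro hhi hlohi hlo hhi2
    rw [bsLoop]
    simp only [dif_pos h]
    rw [if_pos hlt]
    have hmid : (lo + hi) / 2 < seen.length := by omega
    have hmx : seen[(lo + hi) / 2] < x := by
      rwa [List.getD_eq_getElem seen 0 hmid] at hlt
    exact ih hhi (by omega)
      (fun k hk hkm => lt_of_le_of_lt (pairwise_le_getElem seen hs k ((lo + hi) / 2) hmid (by omega)) hmx)
      hhi2
  | case2 lo hi h mid hlt ih =>
    intro hhi hlohi hlo hhi2
    rw [bsLoop]
    simp only [dif_pos h]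
    rw [if_neg hlt]
    have hmid : (lo + hi) / 2 < seen.length := by omega
    have hmx : ¬ seen[(lo + hi) / 2] < x := by
      rwa [List.getD_eq_getElem seen 0 hmid] at hlt
    refine ih (by omega) (by omega) hlo ?_
    intro k hk hkm hcon
    exact hmx (lt_of_le_of_lt (pairwise_le_getElem seen hs ((lo + hi) / 2) k hk hkm) hcon)
  | case3 lo hi h =>
    intro hhi hlohi hlo hhi2
    rw [bsLoop]
    simp only [dif_neg h]
    have : lo = hi := by omega
    subst this
    exact (countP_split seen _ lo (by omega)
      (fun k hk hkm => by simp [hlo k hk hkm])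
      (fun k hk hkm => by simp [hhi2 k hk hkm])).symm

lemma insert_sorted (l : List Int) (x : Int) (hs : l.Pairwise (· ≤ ·)) :
    (l.take (l.countP (fun y => decide (y < x))) ++
      x :: l.drop (l.countP (fun y => decide (y < x)))).Pairwise (· ≤ ·) := by
  induction l with
  | nil => simp
  | cons y t ih =>
    rw [List.pairwise_cons] at hs
    obtain ⟨hy, ht⟩ := hs
    by_cases hx : y < x
    · have hc : (y :: t).countP (fun y => decide (y < x))
          = t.countP (fun y => decide (y < x)) + 1 := by
        simp [hx]
      rw [hc, List.take_succ_cons, List.drop_succ_cons, List.cons_append,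
        List.pairwise_cons]
      refine ⟨?_, ih ht⟩
      intro z hz
      rcases List.mem_append.mp hz with h | h
      · exact hy z (List.take_subset _ _ h)
      · rcases List.mem_cons.mp h with rfl | h
        · exact le_of_lt hx
        · exact hy z (List.drop_subset _ _ h)
    · have hc : (y :: t).countP (fun y => decide (y < x)) = 0 := by
        rw [List.countP_eq_zero]
        intro z hz
        rcases List.mem_cons.mp hz with rfl | h
        · simp [hx]
        · simp only [decide_eq_true_eq]
          exact fun hcon => hx (lt_of_le_of_lt (hy z h) hcon)
      rw [hc, List.take_zero, List.drop_zero, List.nil_append, List.pairwise_cons]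
      refine ⟨?_, List.pairwise_cons.mpr ⟨hy, ht⟩⟩
      intro z hz
      rcases List.mem_cons.mp hz with rfl | h
      · omega
      · exact le_trans (by omega) (hy z h)

lemma insert_perm (l : List Int) (m : Nat) (x : Int) :
    (l.take m ++ x :: l.drop m).Perm (x :: l) := by
  have := List.perm_middle (a := x) (l₁ := l.take m) (l₂ := l.drop m)
  simpa [List.take_append_drop] using this

lemma B_loop : ∀ (rest seen pre : List Int) (best : Int),
    seen.Perm pre → seen.Pairwise (· ≤ ·) →
    (rest.foldl (fun (st : List Int × Int) x =>
      let seen := st.1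
      let best := st.2
      let lo := bsLoop seen x 0 seen.length
      let best' := if (lo : Int) > best then (lo : Int) else best
      (PySem.List.insert seen (lo : Int) x, best')) (seen, best)).2 = gRun rest pre best := by
  intro rest
  induction rest with
  | nil => intro seen pre best _ _; simp [gRun]
  | cons x rest ih =>
    intro seen pre best hperm hs
    rw [List.foldl_cons, gRun]
    simp only
    have hbs : bsLoop seen x 0 seen.length = seen.countP (fun y => decide (y < x)) :=
      bsLoop_eq seen x 0 seen.length hs (le_refl _) (by omega)
        (fun k hk hkm => by omega) (fun k hk hkm => by omega)
    have hcount : seen.countP (fun y => decide (y < x)) = pre.countP (fun y => decide (y < x)) :=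
      hperm.countP_eq _
    have hle : seen.countP (fun y => decide (y < x)) ≤ seen.length :=
      List.countP_le_length
    rw [hbs, PySem.List.insert_natCast seen _ x hle]
    rw [ih _ _ _ ((insert_perm seen _ x).trans
          ((hperm.cons x).trans (List.perm_append_singleton x pre).symm))
        (insert_sorted seen x hs)]
    rw [hcount, maxIf]

lemma A_inner (T : List Int) (v : Int) : ∀ (k : Nat) (c : Int), k ≤ T.length →
    (PySem.List.pyRange 0 (k : Int) 1).foldl
      (fun c j => if PySem.List.pyGetD T j 0 < v then c + 1 else c) c
    = c + ((T.take k).countP (fun y => decide (y < v)) : Int) := by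
  intro k
  induction k with
  | zero =>
    intro c _
    rw [show ((0 : Nat) : Int) = 0 by norm_num, PySem.List.pyRange_one_eq_nil (by omega)]
    simp
  | succ k ih =>
    intro c hk
    rw [show ((k + 1 : Nat) : Int) = (k : Int) + 1 by push_cast; ring,
      PySem.List.pyRange_one_succ_right (by omega), List.foldl_append, ih c (by omega)]
    have hkl : k < T.length := by omega
    rw [List.foldl_cons, List.foldl_nil, List.take_add_one,
      List.getElem?_eq_getElem hkl]
    rw [PySem.List.pyGetD_natCast]
    rw [List.countP_append, List.getD_eq_getElem T 0 hkl]
    by_cases hx : T[k] < v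
    · rw [if_pos hx]; simp [hx]; ring
    · rw [if_neg hx]; simp [hx]

lemma A_outer (T : List Int) : ∀ (m k : Nat) (best : Int), k + m = T.length →
    (PySem.List.pyRange (k : Int) (T.length : Int) 1).foldl (fun result i =>
      let currRank : Int := (PySem.List.pyRange 0 i 1).foldl
          (fun c j => if PySem.List.pyGetD T j 0 < PySem.List.pyGetD T i 0 then c + 1 else c) 0
      if currRank > result then currRank else result) best
    = gRun (T.drop k) (T.take k) best := by
  intro m
  induction m with
  | zero =>
    intro k best hk
    rw [show (k : Int) = (T.length : Int) by omega, PySem.List.pyRange_one_eq_nil (by omega),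
      List.foldl_nil, List.drop_of_length_le (by omega), gRun]
  | succ m ih =>
    intro k best hk
    have hkl : k < T.length := by omega
    rw [PySem.List.pyRange_one_cons (by exact_mod_cast hkl), List.foldl_cons]
    simp only
    rw [A_inner T _ k 0 (by omega), PySem.List.pyGetD_natCast, List.getD_eq_getElem T 0 hkl]
    rw [show (k : Int) + 1 = ((k + 1 : Nat) : Int) by push_cast; ring, ih (k + 1) _ (by omega)]
    rw [List.drop_eq_getElem_cons hkl, gRun, List.take_add_one, List.getElem?_eq_getElem hkl]
    rw [zero_add, maxIf]
    simp

-- ===== VERDICT (by name: the statement is the Claim_ definition above) =====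
theorem maxrank_spec : Claim_equal_maxrank := by
  intro T _
  unfold Spec_maxrank
  have hB : maxrank_alt T = gRun T [] 0 := by
    unfold maxrank_alt
    exact B_loop T [] [] 0 (List.Perm.refl _) (by simp)
  have hA : maxrank T = gRun T [] 0 := by
    unfold maxrank
    cases T with
    | nil =>
      rw [gRun]
      simp only [List.length_nil]
      rw [show ((0 : Nat) : Int) = 0 by norm_num, PySem.List.pyRange_one_eq_nil (by omega),
        List.foldl_nil]
    | cons t0 rest =>
      simp only
      have h := A_outer (t0 :: rest) rest.length 1 0 (by simp [Nat.add_comm])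
      push_cast at h
      rw [h]
      simp [gRun]
  rw [hA, hB]
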